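-- pv_equiv track=rewrite | github.com/jay0423/separate_group_ga | src/init_individual.py | _find_max_m_solution
-- ===== SOURCE A (Python) =====
-- def _find_max_m_solution(A, p, extension_factor):
--     max_m = 0
--     best_solution = None
--
--     # extension_factor を加味した A の調整
--     # A' = A - (p - 1) * extension_factor * p
--     A_adjusted = A - (p - 1) * extension_factor * p
--
--     for n in range(0, A):
--         if (A_adjusted - (p - 1) * n) % p == 0:
--             m = (A_adjusted - (p - 1) * n) // p
--             if m > 0 and m > max_m:
--                 max_m = m
--                 best_solution = (p, m, n, extension_factor)
--
--     return best_solution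
-- ===== SOURCE B (Python) =====
-- def _find_max_m_solution(A, p, extension_factor):
--     if A <= 0:
--         return None
--     A_adjusted = A - (p - 1) * extension_factor * p
--     n0 = (-A_adjusted) % abs(p)
--     if n0 >= A:
--         return None
--     m = (A_adjusted - (p - 1) * n0) // p
--     return (p, m, n0, extension_factor) if m > 0 else None
-- ===== Notes on version B (the rewrite author's own statement) =====
-- stated objective: faster
-- what changed: Replaces the O(A) scan over n in range(A) by a closed-form O(1) solution: since (p-1) == -1 mod p, valid n are exactly n == -A_adjusted (mod |p|), and m is non-increasing over valid n, so the smallest valid n gives the best solution.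
import Mathlib
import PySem

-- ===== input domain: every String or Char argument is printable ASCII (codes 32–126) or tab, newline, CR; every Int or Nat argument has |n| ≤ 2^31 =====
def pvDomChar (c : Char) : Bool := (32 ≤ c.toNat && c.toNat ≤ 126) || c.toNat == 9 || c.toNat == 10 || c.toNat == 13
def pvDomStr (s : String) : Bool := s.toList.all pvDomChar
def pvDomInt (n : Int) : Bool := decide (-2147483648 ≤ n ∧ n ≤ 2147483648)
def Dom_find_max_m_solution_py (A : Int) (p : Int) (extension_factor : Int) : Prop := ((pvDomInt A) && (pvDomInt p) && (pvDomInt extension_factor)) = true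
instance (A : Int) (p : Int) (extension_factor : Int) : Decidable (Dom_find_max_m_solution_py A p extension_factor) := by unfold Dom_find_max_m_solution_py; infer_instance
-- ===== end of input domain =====

-- B replaces A's O(A) scan over n by the O(1) closed form n0 = (-A_adjusted) mod |p|
-- (valid n are exactly n ≡ -A_adjusted (mod |p|) and m is non-increasing over them).

-- ===== PORT A =====
-- one loop iteration of A: state = (max_m, best_solution)
def pvStepA (p extension_factor A_adjusted : Int) (st : Int × Option (List Int)) (n : Int) :
    Int × Option (List Int) :=
  if PySem.Int.mod (A_adjusted - (p - 1) * n) p = 0 then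
    let m := PySem.Int.floordiv (A_adjusted - (p - 1) * n) p
    if m > 0 ∧ m > st.1 then (m, some [p, m, n, extension_factor]) else st
  else st

def find_max_m_solution_py (A : Int) (p : Int) (extension_factor : Int) : Option (List Int) :=
  let A_adjusted := A - (p - 1) * extension_factor * p
  ((PySem.List.pyRange 0 A 1).foldl (pvStepA p extension_factor A_adjusted) (0, none)).2

-- ===== PORT B =====
def find_max_m_solution_py_alt (A : Int) (p : Int) (extension_factor : Int) : Option (List Int) :=
  if A ≤ 0 then none
  else
    let A_adjusted := A - (p - 1) * extension_factor * p
    let n0 := PySem.Int.mod (-A_adjusted) |p|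
    if n0 ≥ A then none
    else
      let m := PySem.Int.floordiv (A_adjusted - (p - 1) * n0) p
      if m > 0 then some [p, m, n0, extension_factor] else none

-- ===== PRECONDITION & SPEC =====
-- Pre_ excludes exactly the inputs where the Pythons raise ZeroDivisionError (p = 0 with A > 0);
-- both A and B raise there, so nothing A returns on is excluded.
def Pre_find_max_m_solution_py (A : Int) (p : Int) (extension_factor : Int) : Prop :=
  A ≤ 0 ∨ p ≠ 0
instance (A : Int) (p : Int) (extension_factor : Int) : Decidable (Pre_find_max_m_solution_py A p extension_factor) := by unfold Pre_find_max_m_solution_py; infer_instance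

def pvWitness_find_max_m_solution_py : Int × Int × Int := (7, 2, 1)

def Spec_find_max_m_solution_py (A : Int) (p : Int) (extension_factor : Int) (out : Option (List Int)) : Prop := out = find_max_m_solution_py_alt A p extension_factor
instance (A : Int) (p : Int) (extension_factor : Int) (out : Option (List Int)) : Decidable (Spec_find_max_m_solution_py A p extension_factor out) := by unfold Spec_find_max_m_solution_py; infer_instance

-- ===== CLAIM (what is proved, stated in full; the proofs are below) =====
def Claim_equal_find_max_m_solution_py : Prop := ∀ (A : Int) (p : Int) (extension_factor : Int), Dom_find_max_m_solution_py A p extension_factor → Pre_find_max_m_solution_py A p extension_factor → Spec_find_max_m_solution_py A p extension_factor (find_max_m_solution_py A p extension_factor)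

-- ===== LEMMAS AND PROOFS =====

-- the loop state after the iterations n = 0 … a-1, expressed by the closed form
def pvTarget (p extension_factor A_adjusted n0 : Int) (a : Int) : Int × Option (List Int) :=
  let m0 := PySem.Int.floordiv (A_adjusted - (p - 1) * n0) p
  if n0 < a ∧ m0 > 0 then (m0, some [p, m0, n0, extension_factor]) else (0, none)

-- validity of n ⟺ n ≡ -A_adjusted (mod |p|)
theorem pv_valid_iff (p A_adjusted n : Int) (hp : p ≠ 0) :
    PySem.Int.mod (A_adjusted - (p - 1) * n) p = 0 ↔
      n % |p| = (-A_adjusted) % |p| := by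
  rw [PySem.Int.mod_eq_zero_iff_dvd]
  have h1 : A_adjusted - (p - 1) * n = (n + A_adjusted) - n * p := by ring
  rw [h1]
  have hnp : p ∣ n * p := ⟨n, mul_comm n p⟩
  have h2 : p ∣ (n + A_adjusted) - n * p ↔ p ∣ (n + A_adjusted) := by
    constructor
    · intro h
      have := dvd_add h hnp
      simpa using this
    · intro h
      exact dvd_sub h hnp
  rw [h2, ← abs_dvd]
  have h3 : n + A_adjusted = n - (-A_adjusted) := by ring
  rw [h3]
  constructor
  · intro h
    exact (Int.modEq_iff_dvd.mpr h).symm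
  · intro h
    exact Int.modEq_iff_dvd.mp h.symm

-- monotonicity: a later valid n never gives a larger m
theorem pv_m_le (p A_adjusted n0 a : Int) (hp : p ≠ 0) (hlt : n0 < a)
    (h0 : p ∣ (A_adjusted - (p - 1) * n0)) (ha : p ∣ (A_adjusted - (p - 1) * a)) :
    PySem.Int.floordiv (A_adjusted - (p - 1) * a) p ≤
      PySem.Int.floordiv (A_adjusted - (p - 1) * n0) p := by
  set m0 := PySem.Int.floordiv (A_adjusted - (p - 1) * n0) p with hm0
  set ma := PySem.Int.floordiv (A_adjusted - (p - 1) * a) p with hma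
  have e0 : m0 * p = A_adjusted - (p - 1) * n0 := by
    have := PySem.Int.floordiv_mul_add_mod (A_adjusted - (p - 1) * n0) p
    rw [(PySem.Int.mod_eq_zero_iff_dvd _ _).2 h0, ← hm0] at this; omega
  have ea : ma * p = A_adjusted - (p - 1) * a := by
    have := PySem.Int.floordiv_mul_add_mod (A_adjusted - (p - 1) * a) p
    rw [(PySem.Int.mod_eq_zero_iff_dvd _ _).2 ha, ← hma] at this; omega
  have key : p * (m0 - ma) = (p - 1) * (a - n0) := by nlinarith [e0, ea]
  by_contra hc
  push_neg at hc
  rcases lt_trichotomy p 0 with h | h | h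
  · nlinarith
  · exact hp h
  · rcases eq_or_lt_of_le (by omega : (1:Int) ≤ p) with h1 | h1
    · nlinarith
    · nlinarith

-- one step of the loop advances the closed form
theorem pv_step (p extension_factor A_adjusted a : Int) (hp : p ≠ 0) (ha : 0 ≤ a) :
    pvStepA p extension_factor A_adjusted
      (pvTarget p extension_factor A_adjusted ((-A_adjusted) % |p|) a) a =
    pvTarget p extension_factor A_adjusted ((-A_adjusted) % |p|) (a + 1) := by
  have hq : (0:Int) < |p| := by positivity
  set n0 := (-A_adjusted) % |p| with hn0
  have hn0lt : n0 < |p| := Int.emod_lt_of_pos _ hq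
  have hn0nn : 0 ≤ n0 := Int.emod_nonneg _ (by omega)
  set m0 := PySem.Int.floordiv (A_adjusted - (p - 1) * n0) p with hm0
  by_cases hv : PySem.Int.mod (A_adjusted - (p - 1) * a) p = 0
  · -- a is valid, hence a ≡ n0 (mod |p|), hence n0 ≤ a
    have hcong : a % |p| = n0 := (pv_valid_iff p A_adjusted a hp).1 hv
    have hage : n0 ≤ a := by
      by_contra hlt
      push_neg at hlt
      rw [Int.emod_eq_of_lt ha (by omega)] at hcong
      omega
    rcases eq_or_lt_of_le hage with heq | hlt
    · -- a = n0 : the (only possible) update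
      subst heq
      simp only [pvStepA, pvTarget, hv, if_true, ← hm0]
      by_cases hm : m0 > 0
      · simp [hm, lt_irrefl, (by omega : n0 < n0 + 1)]
      · simp [hm, lt_irrefl]
    · -- n0 < a : no update, because m(a) ≤ m0
      have hvn0 : p ∣ (A_adjusted - (p - 1) * n0) := by
        rw [← PySem.Int.mod_eq_zero_iff_dvd, pv_valid_iff p A_adjusted n0 hp]
        exact Int.emod_eq_of_lt hn0nn hn0lt
      have hva : p ∣ (A_adjusted - (p - 1) * a) := (PySem.Int.mod_eq_zero_iff_dvd _ _).1 hv
      have hle := pv_m_le p A_adjusted n0 a hp hlt hvn0 hva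
      simp only [pvStepA, pvTarget, hv, if_true, ← hm0]
      by_cases hm : m0 > 0
      · simp only [hlt, hm, and_true, if_true, (by omega : n0 < a + 1)]
        have : ¬ (PySem.Int.floordiv (A_adjusted - (p - 1) * a) p > 0 ∧
                  PySem.Int.floordiv (A_adjusted - (p - 1) * a) p > m0) := by
          rw [← hm0] at hle; omega
        simp [this]
      · simp only [hm, and_false, if_false]
        have : ¬ (PySem.Int.floordiv (A_adjusted - (p - 1) * a) p > 0 ∧
                  PySem.Int.floordiv (A_adjusted - (p - 1) * a) p > (0:Int)) := by
          rw [← hm0] at hle; omega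
        simp [this]
        rw [← hm0] at hle
        omega
  · -- a invalid : state unchanged, and n0 ≠ a so the closed form is unchanged too
    have hne : n0 ≠ a := by
      intro h
      apply hv
      rw [pv_valid_iff p A_adjusted a hp, ← h]
      exact Int.emod_eq_of_lt hn0nn hn0lt
    by_cases hcase : n0 < a ∧ m0 > 0
    · have h1 : n0 < a + 1 ∧ m0 > 0 := ⟨by omega, hcase.2⟩
      simp [pvStepA, hv, pvTarget, ← hm0, hcase, h1]
    · have h1 : ¬ (n0 < a + 1 ∧ m0 > 0) := by
        intro h; exact hcase ⟨by omega, h.2⟩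
      simp [pvStepA, hv, pvTarget, ← hm0, hcase, h1]
      omega

-- folding the loop from a to A keeps the closed form
theorem pv_fold (p extension_factor A_adjusted A : Int) (hp : p ≠ 0) :
    ∀ (k : Nat) (a : Int), 0 ≤ a → a + k = A →
    (PySem.List.pyRange a A 1).foldl (pvStepA p extension_factor A_adjusted)
        (pvTarget p extension_factor A_adjusted ((-A_adjusted) % |p|) a) =
      pvTarget p extension_factor A_adjusted ((-A_adjusted) % |p|) A := by
  intro k
  induction k with
  | zero =>
    intro a ha hA
    have : ¬ a < A := by omega
    have hr : PySem.List.pyRange a A 1 = [] := by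
      simp [PySem.List.pyRange, this]
    rw [hr]
    simp only [List.foldl_nil]
    have : a = A := by omega
    rw [this]
  | succ n ih =>
    intro a ha hA
    have hlt : a < A := by omega
    rw [PySem.List.pyRange_one_cons hlt, List.foldl_cons,
        pv_step p extension_factor A_adjusted a hp ha]
    exact ih (a + 1) (by omega) (by omega)

-- ===== VERDICT (by name: the statement is the Claim_ definition above) =====
theorem find_max_m_solution_py_spec : Claim_equal_find_max_m_solution_py := by
  intro A p extension_factor _ hpre
  unfold Spec_find_max_m_solution_py
  have goalA : find_max_m_solution_py A p extension_factor =
      ((PySem.List.pyRange 0 A 1).foldl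
        (pvStepA p extension_factor (A - (p - 1) * extension_factor * p)) (0, none)).2 := rfl
  have goalB : find_max_m_solution_py_alt A p extension_factor =
      (if A ≤ 0 then none
       else if PySem.Int.mod (-(A - (p - 1) * extension_factor * p)) |p| ≥ A then none
       else if PySem.Int.floordiv
            ((A - (p - 1) * extension_factor * p) -
              (p - 1) * PySem.Int.mod (-(A - (p - 1) * extension_factor * p)) |p|) p > 0
            then some [p,
              PySem.Int.floordiv
                ((A - (p - 1) * extension_factor * p) -
                  (p - 1) * PySem.Int.mod (-(A - (p - 1) * extension_factor * p)) |p|) p,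
              PySem.Int.mod (-(A - (p - 1) * extension_factor * p)) |p|, extension_factor]
            else none) := rfl
  rw [goalA, goalB]
  set A_adjusted := A - (p - 1) * extension_factor * p with hAa
  by_cases hA : A ≤ 0
  · have hr : PySem.List.pyRange 0 A 1 = [] := by
      simp [PySem.List.pyRange]
      omega
    simp [hr, hA]
  · have hp : p ≠ 0 := by
      rcases hpre with h | h
      · omega
      · exact h
    push_neg at hA
    have hq : (0:Int) < |p| := by positivity
    have hmod : PySem.Int.mod (-A_adjusted) |p| = (-A_adjusted) % |p| :=
      PySem.Int.mod_eq_emod_of_pos hq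
    set n0 := (-A_adjusted) % |p| with hn0
    have hstart : ((0:Int), (none : Option (List Int))) =
        pvTarget p extension_factor A_adjusted n0 0 := by
      have : ¬ (n0 < 0 ∧ PySem.Int.floordiv (A_adjusted - (p - 1) * n0) p > 0) := by
        have := Int.emod_nonneg (-A_adjusted) (by omega : |p| ≠ 0)
        rw [← hn0] at this
        intro h; omega
      simp [pvTarget, this]
    rw [hstart, pv_fold p extension_factor A_adjusted A hp A.toNat 0 le_rfl (by omega)]
    rw [hmod]
    simp only [pvTarget, ← hn0]
    by_cases h1 : n0 ≥ A
    · have hcond : ¬ (n0 < A ∧ 0 < PySem.Int.floordiv (A_adjusted - (p - 1) * n0) p) :=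
        fun h => absurd h.1 (by omega)
      simp [h1, hcond, hA]
    · by_cases h2 : PySem.Int.floordiv (A_adjusted - (p - 1) * n0) p > 0
      · simp [h1, (by omega : n0 < A), h2, hA]
      · simp [h1, h2, hA]
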